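-- pv_equiv track=rewrite | github.com/liupengsay/PyIsTheBestLang | src/dp/matrix_dp/problem.py | lc_2430
-- ===== SOURCE A (Python) =====
-- def lc_2430(s: str) -> int:
--     """
--     url: https://leetcode.cn/problems/maximum-deletions-on-a-string/
--     tag: lcp|matrix_dp
--     """
--     # 双重DPLCP与matrix_dp
--     n = len(s)
--     lcp = [[0] * (n + 1) for _ in range(n + 1)]
--     for i in range(n - 1, -1, -1):
--         for j in range(i + 1, n):
--             if s[i] == s[j]:
--                 lcp[i][j] = lcp[i + 1][j + 1] + 1
--
--     dp = [1] * (n + 1)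
--     for i in range(n - 1, -1, -1):
--         for j in range(1, (n - i) // 2 + 1):
--             if lcp[i][i + j] >= j:
--                 dp[i] = dp[i] if dp[i] > dp[i + j] + 1 else dp[i + j] + 1
--     return dp[0]
-- ===== SOURCE B (Python) =====
-- def lc_2430(s: str) -> int:
--     # No LCP table: dp built back-to-front as a growing list, equal adjacent
--     # prefixes checked directly by slice comparison.
--     n = len(s)
--     dp = [1]  # dp[k] = answer for the suffix starting at (current i) + 1 + k
--     for i in range(n - 1, -1, -1):
--         cand = [dp[j - 1] + 1
--                 for j in range(1, (n - i) // 2 + 1)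
--                 if s[i:i + j] == s[i + j:i + 2 * j]]
--         dp = [max(cand, default=1)] + dp
--     return dp[0]
-- ===== Notes on version B (the rewrite author's own statement) =====
-- stated objective: simpler
-- what changed: Dropped A's (n+1)x(n+1) LCP precompute table entirely: B builds the dp list back-to-front (prepending each suffix answer) and tests equal adjacent prefixes directly with slice comparison and max over a comprehension, instead of mutating a preallocated dp array under an lcp[i][i+j]>=j table lookup.
import Mathlib
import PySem

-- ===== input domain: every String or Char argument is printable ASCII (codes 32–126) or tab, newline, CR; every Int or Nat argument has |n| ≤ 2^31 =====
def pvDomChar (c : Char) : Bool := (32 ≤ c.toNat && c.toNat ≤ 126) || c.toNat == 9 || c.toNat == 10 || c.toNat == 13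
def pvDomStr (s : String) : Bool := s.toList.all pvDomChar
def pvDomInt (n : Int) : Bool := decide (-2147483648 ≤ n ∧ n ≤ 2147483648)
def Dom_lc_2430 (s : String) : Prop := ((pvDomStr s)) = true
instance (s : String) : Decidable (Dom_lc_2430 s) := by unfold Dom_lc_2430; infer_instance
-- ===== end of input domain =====

-- B drops A's quadratic LCP precompute table and instead builds the dp list
-- back-to-front, testing equal adjacent prefixes by direct slice comparison
-- (objective: simpler — no table pass, O(n) space).

-- ===== PORT A =====
-- All list indices A uses are in range, so `getD` is exact for Python's indexing here.
-- inner loop `for j in range(i+1, n)` of the LCP table pass (row i)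
def aLcpInner (cs : List Char) (n i : Nat) (lcp : List (List Int)) : List (List Int) :=
  (List.range' (i+1) (n - (i+1))).foldl
    (fun lcp j =>
      if cs.getD i ' ' = cs.getD j ' ' then
        lcp.set i ((lcp.getD i []).set j (((lcp.getD (i+1) []).getD (j+1) 0) + 1))
      else lcp) lcp

-- outer loop `for i in range(n-1, -1, -1)` of the LCP pass: argument i+1 processes row i, then recurses
def aLcpLoop (cs : List Char) (n : Nat) : Nat → List (List Int) → List (List Int)
  | 0, lcp => lcp
  | i+1, lcp => aLcpLoop cs n i (aLcpInner cs n i lcp)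

-- inner loop `for j in range(1, (n-i)//2 + 1)` of the dp pass
def aDpInner (n i : Nat) (lcp : List (List Int)) (dp : List Int) : List Int :=
  (List.range' 1 ((n - i) / 2)).foldl
    (fun dp (j : Nat) =>
      if (j : Int) ≤ (lcp.getD i []).getD (i+j) 0 then
        dp.set i (if dp.getD i 0 > dp.getD (i+j) 0 + 1 then dp.getD i 0
                  else dp.getD (i+j) 0 + 1)
      else dp) dp

-- outer loop `for i in range(n-1, -1, -1)` of the dp pass
def aDpLoop (n : Nat) (lcp : List (List Int)) : Nat → List Int → List Int
  | 0, dp => dp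
  | i+1, dp => aDpLoop n lcp i (aDpInner n i lcp dp)

def lc_2430 (s : String) : Int :=
  let cs := s.toList
  let n := cs.length
  let lcp := aLcpLoop cs n n (List.replicate (n+1) (List.replicate (n+1) (0 : Int)))
  let dp := aDpLoop n lcp n (List.replicate (n+1) (1 : Int))
  dp.getD 0 1

-- ===== PORT B =====
-- the candidate-list comprehension `[dp[j-1]+1 for j in … if s[i:i+j]==s[i+j:i+2*j]]`
def bCands (cs : List Char) (n i : Nat) (dp : List Int) : List Int :=
  ((List.range' 1 ((n - i) / 2)).filter
    (fun j => PySem.List.slice cs (some (i : Int)) (some ((i + j : Nat) : Int))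
           == PySem.List.slice cs (some ((i + j : Nat) : Int)) (some ((i + 2*j : Nat) : Int)))).map
    (fun j => dp.getD (j-1) 0 + 1)

-- `for i in range(n-1, -1, -1): dp = [max(cand, default=1)] + dp`
def bLoop (cs : List Char) (n : Nat) : Nat → List Int → List Int
  | 0, dp => dp
  | i+1, dp => bLoop cs n i (PySem.List.maxD (bCands cs n i dp) (fun x => x) 1 :: dp)

def lc_2430_alt (s : String) : Int :=
  let cs := s.toList
  let n := cs.length
  (bLoop cs n n [1]).getD 0 1

-- ===== PRECONDITION & SPEC =====
def Spec_lc_2430 (s : String) (out : Int) : Prop := out = lc_2430_alt s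
instance (s : String) (out : Int) : Decidable (Spec_lc_2430 s out) := by unfold Spec_lc_2430; infer_instance

-- ===== CLAIM (what is proved, stated in full; the proofs are below) =====
def Claim_equal_lc_2430 : Prop := ∀ (s : String), Dom_lc_2430 s → Spec_lc_2430 s (lc_2430 s)

-- ===== LEMMAS AND PROOFS =====

-- length of the longest common prefix of the suffixes of cs at i and j
def lcpLen (cs : List Char) (i j : Nat) : Nat :=
  if h : j < cs.length ∧ cs.getD i ' ' = cs.getD j ' ' then
    lcpLen cs (i+1) (j+1) + 1
  else 0
termination_by cs.length - j
decreasing_by omega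

-- the value A's finished LCP table holds at (a, b)
def tval (cs : List Char) (n a b : Nat) : Int :=
  if a < b ∧ b < n then (lcpLen cs a b : Int) else 0

theorem lcp_take (cs : List Char) :
    ∀ (k i j : Nat), i ≤ j → j + k ≤ cs.length →
      (k ≤ lcpLen cs i j ↔ (cs.drop i).take k = (cs.drop j).take k) := by
  intro k
  induction k with
  | zero => intro i j _ _; simp
  | succ k ih =>
    intro i j hij hk
    have hj : j < cs.length := by omega
    have hi : i < cs.length := by omega
    rw [List.drop_eq_getElem_cons hi, List.drop_eq_getElem_cons hj]
    simp only [List.take_succ_cons, List.cons.injEq]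
    rw [lcpLen]
    by_cases hc : cs[i] = cs[j]
    · rw [dif_pos ⟨hj, by rw [List.getD_eq_getElem cs ' ' hi, List.getD_eq_getElem cs ' ' hj]; exact hc⟩]
      have h2 := ih (i+1) (j+1) (by omega) (by omega)
      constructor
      · intro h; exact ⟨hc, h2.mp (by omega)⟩
      · intro h; have := h2.mpr h.2; omega
    · rw [dif_neg (by rw [List.getD_eq_getElem cs ' ' hi, List.getD_eq_getElem cs ' ' hj]; tauto)]
      constructor
      · intro h; omega
      · intro h; exact absurd h.1 hc

theorem tval_step_eq (cs : List Char) (n i c : Nat) (hn : n = cs.length) (hic : i < c) (hc : c < n)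
    (hch : cs.getD i ' ' = cs.getD c ' ') :
    tval cs n i c = tval cs n (i+1) (c+1) + 1 := by
  have hl : lcpLen cs i c = lcpLen cs (i+1) (c+1) + 1 := by
    rw [lcpLen, dif_pos ⟨by omega, hch⟩]
  unfold tval
  rw [if_pos ⟨hic, hc⟩, hl]
  by_cases h1 : c + 1 < n
  · rw [if_pos ⟨by omega, h1⟩]; push_cast; ring
  · rw [if_neg (by omega)]
    have hcn : c + 1 = n := by omega
    have : lcpLen cs (i+1) (c+1) = 0 := by rw [lcpLen, dif_neg (by omega)]
    rw [this]; simp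

theorem tval_step_ne (cs : List Char) (n i c : Nat)
    (hch : ¬ cs.getD i ' ' = cs.getD c ' ') : tval cs n i c = 0 := by
  unfold tval
  split_ifs with h
  · rw [lcpLen, dif_neg (by tauto)]; simp
  · rfl
theorem inner_aux (cs : List Char) (n i : Nat) (hn : n = cs.length) (hi : i < n) :
    ∀ (k c : Nat) (T : List (List Int)), i < c → c + k ≤ n →
    T.length = n+1 → (∀ r ∈ T, r.length = n+1) →
    (∀ a b, a ≤ n → b ≤ n → (T.getD a []).getD b 0 =
        if i+1 ≤ a then tval cs n a b else if a = i ∧ i < b ∧ b < c then tval cs n i b else 0) →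
    (((List.range' c k).foldl
      (fun lcp j =>
        if cs.getD i ' ' = cs.getD j ' ' then
          lcp.set i ((lcp.getD i []).set j (((lcp.getD (i+1) []).getD (j+1) 0) + 1))
        else lcp) T).length = n+1 ∧
     (∀ r ∈ (List.range' c k).foldl
      (fun lcp j =>
        if cs.getD i ' ' = cs.getD j ' ' then
          lcp.set i ((lcp.getD i []).set j (((lcp.getD (i+1) []).getD (j+1) 0) + 1))
        else lcp) T, r.length = n+1) ∧
     (∀ a b, a ≤ n → b ≤ n → (((List.range' c k).foldl
      (fun lcp j =>
        if cs.getD i ' ' = cs.getD j ' ' then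
          lcp.set i ((lcp.getD i []).set j (((lcp.getD (i+1) []).getD (j+1) 0) + 1))
        else lcp) T).getD a []).getD b 0 =
        if i+1 ≤ a then tval cs n a b else if a = i ∧ i < b ∧ b < c + k then tval cs n i b else 0)) := by
  intro k
  induction k with
  | zero =>
    intro c T hic hck hlen hrows hent
    simpa using ⟨hlen, hrows, hent⟩
  | succ k ih =>
    intro c T hic hck hlen hrows hent
    rw [List.range'_succ, List.foldl_cons]
    have hcn : c < n := by omega
    have hiT : i < T.length := by omega
    -- the one-step state
    by_cases hch : cs.getD i ' ' = cs.getD c ' '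
    · rw [if_pos hch]
      set R := T.getD i [] with hR
      have hRmem : R ∈ T := by
        rw [hR, List.getD_eq_getElem T [] hiT]; exact List.getElem_mem hiT
      have hRlen : R.length = n+1 := hrows R hRmem
      have hval : ((T.getD (i+1) []).getD (c+1) 0) + 1 = tval cs n i c := by
        have := hent (i+1) (c+1) (by omega) (by omega)
        rw [if_pos (le_refl _)] at this
        rw [this, ← tval_step_eq cs n i c hn hic hcn hch]
      set T' := T.set i (R.set c ((T.getD (i+1) []).getD (c+1) 0 + 1)) with hT'
      have hlen' : T'.length = n+1 := by rw [hT', List.length_set]; exact hlen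
      have hrows' : ∀ r ∈ T', r.length = n+1 := by
        intro r hr
        rcases List.mem_or_eq_of_mem_set hr with h | h
        · exact hrows r h
        · rw [h, List.length_set]; exact hRlen
      have hent' : ∀ a b, a ≤ n → b ≤ n → (T'.getD a []).getD b 0 =
          if i+1 ≤ a then tval cs n a b else if a = i ∧ i < b ∧ b < c+1 then tval cs n i b else 0 := by
        intro a b ha hb
        by_cases hai : a = i
        · subst hai
          have : T'.getD a [] = R.set c ((T.getD (a+1) []).getD (c+1) 0 + 1) := by
            rw [hT']; simp [List.getD, List.getElem?_set_self hiT]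
          rw [this]
          by_cases hbc : b = c
          · subst hbc
            rw [List.getD_eq_getElem _ 0 (by rw [List.length_set]; omega)]
            rw [List.getElem_set_self (by rw [List.length_set] at *; omega)]
            rw [hval, if_neg (by omega), if_pos ⟨rfl, by omega, by omega⟩]
          · rw [show (R.set c ((T.getD (a+1) []).getD (c+1) 0 + 1)).getD b 0 = R.getD b 0 by
              simp [List.getD, List.getElem?_set_ne (Ne.symm (by omega : b ≠ c))]]
            have := hent a b ha hb
            rw [if_neg (by omega)] at this ⊢
            rw [← hR] at this
            rw [this]
            by_cases h1 : a = a ∧ a < b ∧ b < c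
            · rw [if_pos h1, if_pos ⟨h1.1, h1.2.1, by omega⟩]
            · rw [if_neg h1, if_neg (by intro h2; exact h1 ⟨h2.1, h2.2.1, by omega⟩)]
        · have : T'.getD a [] = T.getD a [] := by
            rw [hT']; simp [List.getD, List.getElem?_set_ne (Ne.symm hai)]
          rw [this, hent a b ha hb]
          by_cases h1 : i + 1 ≤ a
          · rw [if_pos h1, if_pos h1]
          · rw [if_neg h1, if_neg h1, if_neg (by tauto), if_neg (by tauto)]
      have := ih (c+1) T' (by omega) (by omega) hlen' hrows' hent'
      refine ⟨this.1, this.2.1, ?_⟩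
      intro a b ha hb
      rw [this.2.2 a b ha hb]
      have : c + 1 + k = c + (k+1) := by omega
      rw [this]
    · rw [if_neg hch]
      have hent' : ∀ a b, a ≤ n → b ≤ n → (T.getD a []).getD b 0 =
          if i+1 ≤ a then tval cs n a b else if a = i ∧ i < b ∧ b < c+1 then tval cs n i b else 0 := by
        intro a b ha hb
        rw [hent a b ha hb]
        by_cases h1 : i + 1 ≤ a
        · rw [if_pos h1, if_pos h1]
        · rw [if_neg h1, if_neg h1]
          by_cases h2 : a = i ∧ i < b ∧ b < c
          · rw [if_pos h2, if_pos ⟨h2.1, h2.2.1, by omega⟩]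
          · by_cases h3 : a = i ∧ i < b ∧ b < c + 1
            · have hbc : b = c := by omega
              subst hbc
              rw [if_neg h2, if_pos h3, tval_step_ne cs n i b hch]
            · rw [if_neg h2, if_neg h3]
      have := ih (c+1) T (by omega) (by omega) hlen hrows hent'
      refine ⟨this.1, this.2.1, ?_⟩
      intro a b ha hb
      rw [this.2.2 a b ha hb]
      have : c + 1 + k = c + (k+1) := by omega
      rw [this]
def GoodT (cs : List Char) (n i : Nat) (T : List (List Int)) : Prop :=
  T.length = n+1 ∧ (∀ r ∈ T, r.length = n+1) ∧
  ∀ a b, a ≤ n → b ≤ n →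
    (T.getD a []).getD b 0 = if i ≤ a then tval cs n a b else 0

theorem aLcpInner_good (cs : List Char) (n i : Nat) (T : List (List Int))
    (hn : n = cs.length) (hi : i < n) (hT : GoodT cs n (i+1) T) :
    GoodT cs n i (aLcpInner cs n i T) := by
  obtain ⟨hlen, hrows, hent⟩ := hT
  unfold GoodT aLcpInner
  have hent0 : ∀ a b, a ≤ n → b ≤ n → (T.getD a []).getD b 0 =
      if i+1 ≤ a then tval cs n a b else if a = i ∧ i < b ∧ b < i+1 then tval cs n i b else 0 := by
    intro a b ha hb
    rw [hent a b ha hb]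
    by_cases h1 : i+1 ≤ a
    · rw [if_pos h1, if_pos h1]
    · rw [if_neg h1, if_neg h1, if_neg (by omega)]
  have := inner_aux cs n i hn hi (n - (i+1)) (i+1) T (by omega) (by omega) hlen hrows hent0
  refine ⟨this.1, this.2.1, ?_⟩
  intro a b ha hb
  rw [this.2.2 a b ha hb]
  by_cases h1 : i+1 ≤ a
  · rw [if_pos h1, if_pos (by omega : i ≤ a)]
  · by_cases h2 : a = i ∧ i < b ∧ b < i+1 + (n - (i+1))
    · rw [if_pos h2, if_pos (by omega : i ≤ a), h2.1]
      split_ifs <;> rfl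
    · rw [if_neg h2]
      by_cases h3 : i ≤ a
      · have haeq : a = i := by omega
        rw [if_pos h3]
        have h5 : tval cs n a b = 0 := by
          unfold tval
          rw [if_neg (by intro h4; exact h2 ⟨haeq, by omega, by omega⟩)]
        rw [h5]
        split_ifs <;> rfl
      · rw [if_neg h3, if_neg (by omega)]

theorem aLcpLoop_good (cs : List Char) (n : Nat) (hn : n = cs.length) :
    ∀ (i : Nat) (T : List (List Int)), i ≤ n → GoodT cs n i T →
      GoodT cs n 0 (aLcpLoop cs n i T) := by
  intro i
  induction i with
  | zero => intro T _ h; exact h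
  | succ i ih =>
    intro T hle hT
    exact ih (aLcpInner cs n i T) (by omega) (aLcpInner_good cs n i T hn (by omega) hT)

theorem init_good (cs : List Char) (n : Nat) :
    GoodT cs n n (List.replicate (n+1) (List.replicate (n+1) (0 : Int))) := by
  refine ⟨by simp, by intro r hr; rw [List.eq_of_mem_replicate hr]; simp, ?_⟩
  intro a b ha hb
  have h1 : (List.replicate (n+1) (List.replicate (n+1) (0:Int))).getD a [] = List.replicate (n+1) (0:Int) := by
    rw [List.getD_eq_getElem _ _ (by simp; omega), List.getElem_replicate]
  rw [h1, List.getD_eq_getElem _ _ (by simp; omega), List.getElem_replicate]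
  by_cases h : n ≤ a
  · rw [if_pos h]
    unfold tval
    rw [if_neg (by omega)]
  · rw [if_neg h]

theorem getD_rep (i : Nat) (m : Int) (dpB : List Int) :
    ((List.replicate i (1:Int)) ++ m :: dpB).getD i 0 = m := by
  induction i with
  | zero => rfl
  | succ i ih => simpa [List.replicate_succ, List.getD] using ih

theorem getD_rep_add (i j : Nat) (hj : 1 ≤ j) (m : Int) (dpB : List Int) :
    ((List.replicate i (1:Int)) ++ m :: dpB).getD (i+j) 0 = dpB.getD (j-1) 0 := by
  induction i with
  | zero =>
    obtain ⟨j', rfl⟩ : ∃ j', j = j' + 1 := ⟨j - 1, by omega⟩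
    simp [List.getD]
  | succ i ih =>
    have : i + 1 + j = (i + j) + 1 := by omega
    simpa [List.replicate_succ, List.getD, this] using ih

theorem set_rep (i : Nat) (m v : Int) (dpB : List Int) :
    ((List.replicate i (1:Int)) ++ m :: dpB).set i v = (List.replicate i (1:Int)) ++ v :: dpB := by
  induction i with
  | zero => rfl
  | succ i ih => simpa [List.replicate_succ] using ih

theorem innerA_shape (i : Nat) (T : List (List Int)) (dpB : List Int) :
    ∀ (L : List Nat), (∀ j ∈ L, 1 ≤ j) → ∀ (m : Int),
    L.foldl (fun dp (j : Nat) =>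
      if (j : Int) ≤ (T.getD i []).getD (i+j) 0 then
        dp.set i (if dp.getD i 0 > dp.getD (i+j) 0 + 1 then dp.getD i 0
                  else dp.getD (i+j) 0 + 1)
      else dp) (List.replicate i 1 ++ m :: dpB) =
    List.replicate i 1 ++ (L.foldl (fun m (j : Nat) =>
      if (j : Int) ≤ (T.getD i []).getD (i+j) 0 then max m (dpB.getD (j-1) 0 + 1) else m) m) :: dpB := by
  intro L
  induction L with
  | nil => intro _ m; simp
  | cons j L ih =>
    intro hmem m
    have hj : 1 ≤ j := hmem j (by simp)
    simp only [List.foldl_cons]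
    by_cases hc : (j : Int) ≤ (T.getD i []).getD (i+j) 0
    · rw [if_pos hc, if_pos hc, getD_rep, getD_rep_add i j hj, set_rep]
      have hmax : (if m > dpB.getD (j-1) 0 + 1 then m else dpB.getD (j-1) 0 + 1)
          = max m (dpB.getD (j-1) 0 + 1) := by split_ifs <;> omega
      rw [hmax, ih (fun x hx => hmem x (by simp [hx])) _]
    · rw [if_neg hc, if_neg hc, ih (fun x hx => hmem x (by simp [hx])) m]

theorem foldl_max_eq_maxD (cand : List Int) (h : ∀ x ∈ cand, 1 ≤ x) :
    cand.foldl max 1 = PySem.List.maxD cand (fun x => x) 1 := by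
  cases cand with
  | nil => rfl
  | cons x t =>
    rw [PySem.List.maxD, PySem.List.max?_id_cons]
    simp only [List.foldl_cons, Option.getD_some]
    have : max (1:Int) x = x := max_eq_right (h x (by simp))
    rw [this]

theorem cond_iff (cs : List Char) (n : Nat) (hn : n = cs.length) (i j : Nat)
    (h1 : 1 ≤ j) (h2 : i + 2*j ≤ n) :
    ((j : Int) ≤ tval cs n i (i+j)) ↔
      (PySem.List.slice cs (some (i : Int)) (some ((i + j : Nat) : Int))
        == PySem.List.slice cs (some ((i + j : Nat) : Int)) (some ((i + 2*j : Nat) : Int))) = true := by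
  rw [beq_iff_eq, PySem.List.slice_natCast, PySem.List.slice_natCast]
  have e1 : i + j - i = j := by omega
  have e2 : i + 2*j - (i+j) = j := by omega
  rw [e1, e2]
  rw [← lcp_take cs j i (i+j) (by omega) (by omega)]
  unfold tval
  rw [if_pos ⟨by omega, by omega⟩]
  constructor <;> intro h <;> exact_mod_cast h

theorem getD_nonneg (dpB : List Int) (hB : ∀ x ∈ dpB, 1 ≤ x) (t : Nat) :
    0 ≤ dpB.getD t 0 := by
  rw [List.getD]
  cases h : dpB[t]? with
  | none => simp
  | some y =>
    have : y ∈ dpB := List.mem_of_getElem? h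
    simp only [Option.getD_some]
    have := hB y this
    omega

theorem dp_join (cs : List Char) (n : Nat) (T : List (List Int))
    (hn : n = cs.length)
    (hT : ∀ a b, a ≤ n → b ≤ n → (T.getD a []).getD b 0 = tval cs n a b) :
    ∀ (i : Nat), i ≤ n → ∀ (dpB : List Int), (∀ x ∈ dpB, 1 ≤ x) →
      aDpLoop n T i (List.replicate i 1 ++ dpB) = bLoop cs n i dpB := by
  intro i
  induction i with
  | zero => intro _ dpB _; simp [aDpLoop, bLoop]
  | succ i ih =>
    intro hle dpB hB
    have hrep : List.replicate (i+1) (1:Int) ++ dpB = List.replicate i 1 ++ 1 :: dpB := by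
      rw [List.replicate_succ']; simp
    rw [aDpLoop, bLoop, hrep]
    have hmem : ∀ j ∈ List.range' 1 ((n-i)/2), 1 ≤ j := by
      intro j hj; rw [List.mem_range'_1] at hj; omega
    rw [show aDpInner n i T (List.replicate i 1 ++ 1 :: dpB) =
        List.replicate i 1 ++ ((List.range' 1 ((n-i)/2)).foldl (fun m (j : Nat) =>
          if (j : Int) ≤ (T.getD i []).getD (i+j) 0 then max m (dpB.getD (j-1) 0 + 1) else m) 1) :: dpB
      from innerA_shape i T dpB _ hmem 1]
    -- convert the scalar fold to B's max-over-candidates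
    have hcand : ∀ x ∈ bCands cs n i dpB, (1:Int) ≤ x := by
      intro x hx
      rw [bCands, List.mem_map] at hx
      obtain ⟨j, hj, rfl⟩ := hx
      have := getD_nonneg dpB hB (j-1)
      omega
    have hconv : (List.range' 1 ((n-i)/2)).foldl (fun m (j : Nat) =>
          if (j : Int) ≤ (T.getD i []).getD (i+j) 0 then max m (dpB.getD (j-1) 0 + 1) else m) 1
        = PySem.List.maxD (bCands cs n i dpB) (fun x => x) 1 := by
      have hcong : (List.range' 1 ((n-i)/2)).foldl (fun m (j : Nat) =>
            if (j : Int) ≤ (T.getD i []).getD (i+j) 0 then max m (dpB.getD (j-1) 0 + 1) else m) 1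
          = (List.range' 1 ((n-i)/2)).foldl (fun m (j : Nat) =>
            if (PySem.List.slice cs (some (i : Int)) (some ((i + j : Nat) : Int))
              == PySem.List.slice cs (some ((i + j : Nat) : Int)) (some ((i + 2*j : Nat) : Int)))
            then max m (dpB.getD (j-1) 0 + 1) else m) 1 := by
        apply PySem.List.foldl_congr_mem
        intro m j hj
        rw [List.mem_range'_1] at hj
        have h2j : i + 2*j ≤ n := by omega
        rw [hT i (i+j) (by omega) (by omega)]
        rw [if_congr (cond_iff cs n hn i j (by omega) h2j) rfl rfl]
      rw [hcong, PySem.List.foldl_if_eq_foldl_filter, ← List.foldl_map]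
      exact foldl_max_eq_maxD _ hcand
    rw [hconv]
    apply ih (by omega)
    intro x hx
    rcases List.mem_cons.mp hx with h | h
    · subst h
      rw [← foldl_max_eq_maxD _ hcand]
      exact (PySem.List.le_foldl_max _ 1).1
    · exact hB x h

theorem lc_2430_spec : Claim_equal_lc_2430 := by
  intro s _
  unfold Spec_lc_2430 lc_2430 lc_2430_alt
  simp only []
  set cs := s.toList with hcs
  set n := cs.length with hn
  have hG := aLcpLoop_good cs n hn n _ (le_refl n) (init_good cs n)
  obtain ⟨_, _, hent⟩ := hG
  have hT : ∀ a b, a ≤ n → b ≤ n →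
      (((aLcpLoop cs n n (List.replicate (n+1) (List.replicate (n+1) (0:Int)))).getD a []).getD b 0)
        = tval cs n a b := by
    intro a b ha hb
    rw [hent a b ha hb, if_pos (Nat.zero_le a)]
  have hjoin := dp_join cs n _ hn hT n (le_refl n) [1]
    (by intro x hx; simp at hx; omega)
  rw [show List.replicate (n+1) (1:Int) = List.replicate n 1 ++ [1] from List.replicate_succ' ..]
  rw [hjoin]
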